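-- pv_equiv track=rewrite | github.com/mahdiramezanii/Data-Structure-With-Python | infix.py | revers
-- ===== SOURCE A (Python) =====
-- def revers(str_):
--     st=""
--     for i in range(len(str_)-1,-1,-1):
--         if str_[i]==")":
--             st+="("
--
--         elif str_[i]=="(":
--             st+=")"
--         else:
--             st+=str_[i]
--
--     return st
-- ===== SOURCE B (Python) =====
-- def revers(str_):
--     return str_[::-1].translate(str.maketrans("()", ")("))
-- ===== Notes on version B (the rewrite author's own statement) =====
-- stated objective: idiomatic
-- what changed: Replaces the explicit backward index loop with if/elif branches and string += by slice reversal plus a precomputed translation table applied with str.translate.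
import Mathlib
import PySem

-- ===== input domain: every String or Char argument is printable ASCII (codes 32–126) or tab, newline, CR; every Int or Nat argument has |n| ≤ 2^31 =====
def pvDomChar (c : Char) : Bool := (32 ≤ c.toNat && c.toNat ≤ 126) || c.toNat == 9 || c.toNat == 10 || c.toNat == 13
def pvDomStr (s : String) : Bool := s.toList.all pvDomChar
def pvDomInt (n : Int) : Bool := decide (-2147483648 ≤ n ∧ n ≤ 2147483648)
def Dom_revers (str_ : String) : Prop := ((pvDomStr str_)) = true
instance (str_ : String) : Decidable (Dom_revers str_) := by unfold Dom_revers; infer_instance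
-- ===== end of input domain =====

-- B replaces A's backward index loop with slicing reversal plus a precomputed character translation table (idiomatic; no speed claim).

-- ===== PORT A =====
-- backward index loop: for i in range(len(str_)-1, -1, -1), st += swapped char
def revers (str_ : String) : String :=
  let cs := str_.toList
  String.ofList ((PySem.List.pyRange ((cs.length : Int) - 1) (-1) (-1)).foldl
    (fun st i =>
      if PySem.List.pyGetD cs i ' ' = ')' then st ++ ['(']
      else if PySem.List.pyGetD cs i ' ' = '(' then st ++ [')']
      else st ++ [PySem.List.pyGetD cs i ' ']) [])

-- ===== PORT B =====
-- the translation table from str.maketrans("()", ")(")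
def reversTable (c : Char) : Char :=
  if c = '(' then ')' else if c = ')' then '(' else c

-- str_[::-1].translate(table): reverse, then map the table over the characters
def revers_alt (str_ : String) : String :=
  String.ofList (str_.toList.reverse.map reversTable)

-- ===== PRECONDITION & SPEC =====
def Spec_revers (str_ : String) (out : String) : Prop := out = revers_alt str_
instance (str_ : String) (out : String) : Decidable (Spec_revers str_ out) := by unfold Spec_revers; infer_instance

-- ===== CLAIM (what is proved, stated in full; the proofs are below) =====
def Claim_equal_revers : Prop := ∀ (str_ : String), Dom_revers str_ → Spec_revers str_ (revers str_)

-- ===== LEMMAS AND PROOFS =====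

theorem revers_body_eq (cs : List Char) (st : List Char) (i : Int) :
    (if PySem.List.pyGetD cs i ' ' = ')' then st ++ ['(']
     else if PySem.List.pyGetD cs i ' ' = '(' then st ++ [')']
     else st ++ [PySem.List.pyGetD cs i ' ']) = st ++ [reversTable (PySem.List.pyGetD cs i ' ')] := by
  unfold reversTable
  split_ifs <;> simp_all

theorem revers_foldl_map (cs : List Char) (R : List Int) (st : List Char) :
    R.foldl (fun st i =>
      if PySem.List.pyGetD cs i ' ' = ')' then st ++ ['(']
      else if PySem.List.pyGetD cs i ' ' = '(' then st ++ [')']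
      else st ++ [PySem.List.pyGetD cs i ' ']) st
    = st ++ R.map (fun i => reversTable (PySem.List.pyGetD cs i ' ')) := by
  induction R generalizing st with
  | nil => simp
  | cons a R ih => rw [List.foldl_cons, revers_body_eq, ih]; simp

-- ===== VERDICT (by name: the statement is the Claim_ definition above) =====
theorem revers_spec : Claim_equal_revers := by
  intro str_ _
  unfold Spec_revers revers revers_alt
  have hR : PySem.List.pyRange ((str_.toList.length : Int) - 1) (-1) (-1)
      = (PySem.List.pyRange 0 (str_.toList.length : Int) 1).reverse := by
    rw [PySem.List.pyRange_neg_one_eq_reverse]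
    norm_num
  simp only [revers_foldl_map, hR, List.map_reverse, List.nil_append]
  have h := PySem.List.map_pyGetD_pyRange_zero str_.toList ' '
  simp only [PySem.List.len] at h
  rw [show (List.map (fun i => reversTable (PySem.List.pyGetD str_.toList i ' '))
        (PySem.List.pyRange 0 (str_.toList.length : Int) 1))
      = List.map reversTable (List.map (fun i => PySem.List.pyGetD str_.toList i ' ')
        (PySem.List.pyRange 0 (str_.toList.length : Int) 1)) from by simp [Function.comp], h]
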